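-- pv_equiv track=rewrite | github.com/pzalews/aoc2023 | day12/test_s2bak.py | fast_check
-- ===== SOURCE A (Python) =====
-- def fast_check(s, regex):
--     strict = True
--     if "?" in s:
--         s = s[0 : s.index("?")]
--         strict = False
--     count = 0
--     countg = 0
--     for c in s:
--         if c == "#":
--             count += 1
--         elif c == ".":
--             if count > 0:
--                 if countg >= len(regex) or regex[countg] != count:
--                     return False
--                 countg += 1
--                 count = 0
--
--     if count > 0:
--         if countg >= len(regex) or regex[countg] < count:
--             return False
--         if strict and regex[countg] != count:
--             return False
--         countg += 1
--     if strict and countg != len(regex):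
--         return False
--
--     return True
-- ===== SOURCE B (Python) =====
-- def fast_check(s, regex):
--     strict = "?" not in s
--     if not strict:
--         s = s[:s.index("?")]
--     runs = [seg.count("#") for seg in s.split(".")]
--     done = [r for r in runs[:-1] if r > 0]
--     tail = runs[-1]
--     if done != regex[:len(done)]:
--         return False
--     k = len(done)
--     if tail > 0:
--         if k >= len(regex) or regex[k] < tail:
--             return False
--         if strict and regex[k] != tail:
--             return False
--         k += 1
--     return (not strict) or k == len(regex)
-- ===== Notes on version B (the rewrite author's own statement) =====
-- stated objective: alternative
-- what changed: B first builds the run-length list (split the '?'-truncated string on '.', count '#' per segment), then validates the completed runs as a prefix of regex and applies the trailing-run checks, instead of A's single character loop fusing counting and checking with early returns.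
import Mathlib
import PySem

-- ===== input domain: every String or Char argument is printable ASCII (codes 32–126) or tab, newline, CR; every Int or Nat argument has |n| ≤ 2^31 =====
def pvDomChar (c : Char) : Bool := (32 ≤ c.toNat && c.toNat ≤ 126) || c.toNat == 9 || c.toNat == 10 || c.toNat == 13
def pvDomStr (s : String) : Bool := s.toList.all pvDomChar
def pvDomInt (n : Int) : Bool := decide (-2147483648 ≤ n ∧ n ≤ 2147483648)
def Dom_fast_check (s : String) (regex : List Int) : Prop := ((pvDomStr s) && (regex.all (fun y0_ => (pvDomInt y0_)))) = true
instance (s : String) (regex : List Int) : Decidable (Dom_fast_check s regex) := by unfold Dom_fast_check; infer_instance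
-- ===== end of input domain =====

-- B rebuilds the check from the run-length list: split the '?'-truncated string on '.', count '#' per
-- segment, and validate the completed runs as a prefix of regex — one decomposition instead of A's fused
-- character loop (objective: alternative decomposition, same cost).

-- ===== PORT A =====
-- the 'for c in s' loop of A (early 'return False' folded into the result), then A's post-loop checks
def fastCheckLoop (regex : List Int) (strict : Bool) : List Char → Int → Nat → Bool
  | [], count, countg =>
    if count > 0 then
      if decide (countg ≥ regex.length) || decide (regex.getD countg 0 < count) then false
      else if strict && decide (regex.getD countg 0 ≠ count) then false
      else if strict && decide (countg + 1 ≠ regex.length) then false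
      else true
    else if strict && decide (countg ≠ regex.length) then false else true
  | c :: cs, count, countg =>
    if c = '#' then fastCheckLoop regex strict cs (count + 1) countg
    else if c = '.' then
      if count > 0 then
        if decide (countg ≥ regex.length) || decide (regex.getD countg 0 ≠ count) then false
        else fastCheckLoop regex strict cs 0 (countg + 1)
      else fastCheckLoop regex strict cs count countg
    else fastCheckLoop regex strict cs count countg

def fast_check (s : String) (regex : List Int) : Bool :=
  if PySem.Str.isIn "?" s then
    -- s = s[0 : s.index("?")]; index is guarded by the membership test, so find = index here
    fastCheckLoop regex false
      (PySem.Chars.slice s.toList (some 0) (some (PySem.Str.find s "?"))) 0 0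
  else fastCheckLoop regex true s.toList 0 0

-- ===== PORT B =====
def fast_check_alt (s : String) (regex : List Int) : Bool :=
  let strict := !(PySem.Str.isIn "?" s)
  let cs := if strict then s.toList
            else PySem.Chars.slice s.toList none (some (PySem.Str.find s "?"))
  let runs : List Int := (PySem.Chars.splitOn cs ['.']).map (fun seg => (PySem.Chars.count seg ['#'] : Int))
  let done := (PySem.List.slice runs none (some (-1))).filter (fun r => decide (r > 0))
  -- runs[-1]: split always returns at least one piece, so runs is nonempty and the default is never used
  let tail := (PySem.List.pyGet? runs (-1)).getD 0
  if done ≠ PySem.List.slice regex none (some (done.length : Int)) then false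
  else
    let k := done.length
    if tail > 0 then
      if decide (k ≥ regex.length) || decide (regex.getD k 0 < tail) then false
      else if strict && decide (regex.getD k 0 ≠ tail) then false
      else !strict || decide (k + 1 = regex.length)
    else !strict || decide (k = regex.length)

-- ===== PRECONDITION & SPEC =====
def Spec_fast_check (s : String) (regex : List Int) (out : Bool) : Prop := out = fast_check_alt s regex
instance (s : String) (regex : List Int) (out : Bool) : Decidable (Spec_fast_check s regex out) := by unfold Spec_fast_check; infer_instance

-- ===== CLAIM (what is proved, stated in full; the proofs are below) =====
def Claim_equal_fast_check : Prop := ∀ (s : String) (regex : List Int), Dom_fast_check s regex → Spec_fast_check s regex (fast_check s regex)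

-- ===== LEMMAS AND PROOFS =====

-- reference split: split l on the separator character a, accumulating the current piece in pre
def splitAux (a : Char) (pre : List Char) : List Char → List (List Char)
  | [] => [pre]
  | c :: t => if c = a then pre :: splitAux a [] t else splitAux a (pre ++ [c]) t

def addFirst (k : Int) : List Int → List Int
  | [] => [k]
  | r :: rs => (k + r) :: rs

-- run lengths of l: '#'-counts of the '.'-separated pieces
def countsOf (l : List Char) : List Int :=
  (splitAux '.' [] l).map (fun seg => (seg.count '#' : Int))

-- A's post-loop checks as a function of the trailing count and the matched-group counter
def postA (regex : List Int) (strict : Bool) (count : Int) (countg : Nat) : Bool :=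
  if count > 0 then
    if decide (countg ≥ regex.length) || decide (regex.getD countg 0 < count) then false
    else if strict && decide (regex.getD countg 0 ≠ count) then false
    else if strict && decide (countg + 1 ≠ regex.length) then false
    else true
  else if strict && decide (countg ≠ regex.length) then false else true

-- validate a nonempty run-length list against regex, starting at group index countg
def checkRuns (regex : List Int) (strict : Bool) : List Int → Nat → Bool
  | [], _ => true
  | [r], countg => postA regex strict r countg
  | r :: rs@(_ :: _), countg =>
    if r > 0 then
      if decide (countg ≥ regex.length) || decide (regex.getD countg 0 ≠ r) then false
      else checkRuns regex strict rs (countg + 1)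
    else checkRuns regex strict rs countg

theorem splitAux_ne_nil (a : Char) (pre l : List Char) : splitAux a pre l ≠ [] := by
  induction l generalizing pre with
  | nil => simp [splitAux]
  | cons c t ih => simp only [splitAux]; split <;> simp [ih]

theorem countsOf_ne_nil (l : List Char) : countsOf l ≠ [] := by
  simp [countsOf, splitAux_ne_nil]

theorem addFirst_zero (rs : List Int) (h : rs ≠ []) : addFirst 0 rs = rs := by
  cases rs with
  | nil => exact absurd rfl h
  | cons r rs => simp [addFirst]

theorem splitAux_pre (a : Char) (l pre : List Char) :
    splitAux a pre l = (pre ++ (splitAux a [] l).headD []) :: (splitAux a [] l).tail := by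
  induction l generalizing pre with
  | nil => simp [splitAux]
  | cons c t ih =>
    by_cases hc : c = a
    · simp [splitAux, hc]
    · simp only [splitAux, if_neg hc, List.nil_append]
      rw [ih (pre ++ [c]), ih [c]]
      simp

theorem countsOf_dot (l : List Char) : countsOf ('.' :: l) = 0 :: countsOf l := by
  simp [countsOf, splitAux]

theorem countsOf_cons (c : Char) (l : List Char) (hc : c ≠ '.') :
    countsOf (c :: l) = addFirst (if c = '#' then 1 else 0) (countsOf l) := by
  have h := splitAux_ne_nil '.' [] l
  simp only [countsOf, splitAux, if_neg hc, List.nil_append]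
  rw [splitAux_pre '.' l [c]]
  cases hs : splitAux '.' [] l with
  | nil => exact absurd hs h
  | cons seg segs =>
    simp [addFirst, List.count_cons]
    by_cases hh : c = '#' <;> simp [hh] <;> omega

-- the character loop computes checkRuns of the run-length list, the running count folded into the first run
theorem loop_eq_checkRuns (regex : List Int) (strict : Bool) :
    ∀ (l : List Char) (count : Int) (countg : Nat), 0 ≤ count →
      fastCheckLoop regex strict l count countg =
        checkRuns regex strict (addFirst count (countsOf l)) countg := by
  intro l
  induction l with
  | nil => intro count countg _; simp [fastCheckLoop, countsOf, splitAux, addFirst, checkRuns, postA]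
  | cons c t ih =>
    intro count countg hcount
    by_cases h1 : c = '#'
    · rw [h1]
      show fastCheckLoop regex strict t (count + 1) countg = _
      rw [ih (count + 1) countg (by omega), countsOf_cons '#' t (by decide)]
      cases hs : countsOf t with
      | nil => exact absurd hs (countsOf_ne_nil t)
      | cons r rs => simp [addFirst]; ring_nf
    · by_cases h2 : c = '.'
      · subst h2
        have hnn := countsOf_ne_nil t
        rw [countsOf_dot]
        cases hs : countsOf t with
        | nil => exact absurd hs hnn
        | cons r rs =>
          show (if count > 0 then _ else _) = _
          simp only [addFirst, add_zero]
          show _ = checkRuns regex strict (count :: r :: rs) countg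
          by_cases hpos : count > 0
          · simp only [checkRuns, if_pos hpos]
            split
            · rfl
            · rw [ih 0 (countg + 1) (by omega), addFirst_zero _ (hs ▸ hnn), hs]
          · have hz : count = 0 := by omega
            simp only [checkRuns, if_neg hpos]
            rw [ih count countg hcount, hz, addFirst_zero _ (hs ▸ hnn), hs]
      · rw [show fastCheckLoop regex strict (c :: t) count countg
              = fastCheckLoop regex strict t count countg by
                simp only [fastCheckLoop]; rw [if_neg h1, if_neg h2]]
        rw [ih count countg hcount, countsOf_cons c t h2]
        simp only [if_neg h1]
        cases hs : countsOf t with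
        | nil => exact absurd hs (countsOf_ne_nil t)
        | cons r rs => simp [addFirst]

-- B's trailing-run checks as a function of the trailing run and the number of completed groups
def postB (regex : List Int) (strict : Bool) (tail : Int) (k : Nat) : Bool :=
  if tail > 0 then
    if decide (k ≥ regex.length) || decide (regex.getD k 0 < tail) then false
    else if strict && decide (regex.getD k 0 ≠ tail) then false
    else !strict || decide (k + 1 = regex.length)
  else !strict || decide (k = regex.length)

theorem postA_eq_postB (regex : List Int) (strict : Bool) (r : Int) (k : Nat) :
    postA regex strict r k = postB regex strict r k := by
  unfold postA postB
  cases strict <;> split_ifs <;> simp_all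

theorem checkRuns_eq (regex : List Int) (strict : Bool) :
    ∀ (runs : List Int) (countg : Nat), runs ≠ [] →
      checkRuns regex strict runs countg =
        (let done := runs.dropLast.filter (fun r => decide (r > 0))
         if done = (regex.drop countg).take done.length
         then postB regex strict (runs.getLastD 0) (countg + done.length)
         else false) := by
  intro runs
  induction runs with
  | nil => intro _ h; exact absurd rfl h
  | cons r rs ih =>
    intro countg _
    cases rs with
    | nil => simp [checkRuns, postA_eq_postB]
    | cons r' rs' =>
      have hne : r' :: rs' ≠ [] := by simp
      rw [List.dropLast_cons_of_ne_nil hne]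
      by_cases hr : r > 0
      · simp only [checkRuns, if_pos hr, List.getLastD_cons]
        have hfil : (r :: (r' :: rs').dropLast).filter (fun x => decide (x > 0)) =
            r :: ((r' :: rs').dropLast).filter (fun x => decide (x > 0)) := by
          simp [List.filter_cons, hr]
        rw [hfil]
        by_cases hlen : countg ≥ regex.length
        · have hdrop : regex.drop countg = [] := List.drop_eq_nil_of_le hlen
          simp [hlen, hdrop]
        · push_neg at hlen
          have hdrop : regex.drop countg = regex[countg] :: regex.drop (countg + 1) :=
            List.drop_eq_getElem_cons hlen
          have hgd : regex.getD countg 0 = regex[countg] := List.getD_eq_getElem _ _ hlen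
          by_cases heq : regex.getD countg 0 = r
          · simp only [decide_eq_true_eq, hlen, not_le.mpr hlen, decide_eq_false_iff_not,
              not_not, heq, ne_eq, not_true_eq_false, if_neg, decide_eq_true_eq]
            rw [if_neg (by simp [heq]), ih countg.succ (by simp)]
            simp only [hdrop, List.length_cons, List.take_succ_cons, hgd ▸ heq]
            have : countg + 1 + ((r' :: rs').dropLast.filter (fun x => decide (x > 0))).length
                 = countg + (((r' :: rs').dropLast.filter (fun x => decide (x > 0))).length + 1) := by omega
            rw [this]
            split_ifs with h1 h2 h2
            · congr 1
              cases rs' with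
              | nil => rfl
              | cons x xs => rw [List.getLastD_cons]
            · exact absurd (congrArg (List.cons r) h1) h2
            · exact absurd (((List.cons.injEq _ _ _ _).mp h2).2) h1
            · rfl
          · have hpos : (decide (countg ≥ regex.length) || decide (regex.getD countg 0 ≠ r)) = true := by
              simp only [Bool.or_eq_true, decide_eq_true_eq]
              exact Or.inr (by simpa [List.getD_eq_getElem?_getD] using heq)
            rw [if_pos hpos]
            have hneq : ¬ (r :: List.filter (fun x => decide (x > 0)) (r' :: rs').dropLast
                = List.take (r :: List.filter (fun x => decide (x > 0)) (r' :: rs').dropLast).length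
                    (List.drop countg regex)) := by
              rw [hdrop]
              simp only [List.length_cons, List.take_succ_cons]
              intro hcon
              exact heq (hgd.trans (((List.cons.injEq _ _ _ _).mp hcon).1).symm)
            rw [if_neg hneq]
      · simp only [checkRuns, if_neg hr]
        have hfil : (r :: (r' :: rs').dropLast).filter (fun x => decide (x > 0)) =
            ((r' :: rs').dropLast).filter (fun x => decide (x > 0)) := by
          simp [List.filter_cons, hr]
        rw [hfil, ih countg (by simp)]
        simp only [List.getLastD_cons]

-- bridge: PySem.Chars.splitOn with a one-character separator is splitAux
theorem splitOn_go_eq (a : Char) :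
    ∀ (fuel : Nat) (l cur : List Char) (acc : List (List Char)), l.length < fuel →
      PySem.Chars.splitOn.go [a] fuel l cur acc = acc.reverse ++ splitAux a cur.reverse l := by
  intro fuel
  induction fuel with
  | zero => intro l cur acc h; omega
  | succ f ih =>
    intro l cur acc h
    cases l with
    | nil => simp [PySem.Chars.splitOn.go, splitAux]
    | cons c rest =>
      show (if [a].isPrefixOf (c :: rest) then
              PySem.Chars.splitOn.go [a] f (List.drop [a].length (c :: rest)) [] (cur.reverse :: acc)
            else PySem.Chars.splitOn.go [a] f rest (c :: cur) acc) = _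
      by_cases hc : c = a
      · rw [if_pos (by simp [hc, List.isPrefixOf])]
        simp only [List.length_cons] at h
        rw [ih _ _ _ (by simpa using Nat.lt_of_succ_lt_succ h)]
        simp [splitAux, hc]
      · rw [if_neg (by simp [List.isPrefixOf]; intro hh; exact hc hh.symm)]
        simp only [List.length_cons] at h
        rw [ih _ _ _ (Nat.lt_of_succ_lt_succ h)]
        simp [splitAux, hc]

theorem splitOn_eq (a : Char) (l : List Char) :
    PySem.Chars.splitOn l [a] = splitAux a [] l := by
  show PySem.Chars.splitOn.go [a] (l.length + 1) l [] [] = _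
  rw [splitOn_go_eq a (l.length + 1) l [] [] (by omega)]
  rfl

-- bridge: PySem.Chars.count with a one-character needle is List.count
theorem count_go_eq (a : Char) :
    ∀ (fuel : Nat) (l : List Char) (acc : Nat), l.length ≤ fuel →
      PySem.Chars.count.go [a] fuel l acc = acc + l.count a := by
  intro fuel
  induction fuel with
  | zero => intro l acc h
            cases l with
            | nil => simp [PySem.Chars.count.go]
            | cons c t => simp at h
  | succ f ih =>
    intro l acc h
    cases l with
    | nil => simp [PySem.Chars.count.go]
    | cons c t =>
      show (if [a].isPrefixOf (c :: t) then PySem.Chars.count.go [a] f (List.drop [a].length (c :: t)) (acc + 1)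
            else PySem.Chars.count.go [a] f t acc) = _
      simp only [List.length_cons] at h
      by_cases hc : c = a
      · rw [if_pos (by simp [hc, List.isPrefixOf])]
        rw [show List.drop [a].length (c :: t) = t by simp]
        rw [ih t (acc + 1) (Nat.le_of_succ_le_succ h)]
        simp [List.count_cons, hc]
        omega
      · rw [if_neg (by simp [List.isPrefixOf]; intro hh; exact hc hh.symm)]
        rw [ih t acc (Nat.le_of_succ_le_succ h)]
        simp [List.count_cons, hc]

theorem count_eq_listCount (a : Char) (l : List Char) :
    PySem.Chars.count l [a] = l.count a := by
  show (if ([a] : List Char).isEmpty then l.length + 1 else PySem.Chars.count.go [a] l.length l 0) = _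
  rw [if_neg (by simp)]
  rw [count_go_eq a l.length l 0 (le_refl _)]
  simp

-- runs[-1] on a nonempty list is its last element
theorem pyGet_neg_one (l : List Int) (h : l ≠ []) :
    (PySem.List.pyGet? l (-1)).getD 0 = l.getLastD 0 := by
  have hlen : 0 < l.length := List.length_pos_iff.mpr h
  simp only [PySem.List.pyGet?, PySem.List.pyIdx?]
  rw [if_pos (show -(l.length : Int) ≤ -1 by omega)]
  rw [if_neg (show ¬ (0 : Int) ≤ -1 by decide)]
  show (l[l.length - 1]?).getD 0 = l.getLastD 0
  rw [List.getElem?_eq_getElem (show l.length - 1 < l.length by omega)]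
  simp only [Option.getD_some]
  rw [List.getLastD_eq_getLast?, List.getLast?_eq_getElem?,
      List.getElem?_eq_getElem (show l.length - 1 < l.length by omega), Option.getD_some]

-- the two checks agree for any character list and strictness flag
theorem core_eq (regex : List Int) (strict : Bool) (cs : List Char) :
    fastCheckLoop regex strict cs 0 0 =
      (let runs : List Int := (PySem.Chars.splitOn cs ['.']).map (fun seg => (PySem.Chars.count seg ['#'] : Int))
       let done := (PySem.List.slice runs none (some (-1))).filter (fun r => decide (r > 0))
       let tail := (PySem.List.pyGet? runs (-1)).getD 0
       if done ≠ PySem.List.slice regex none (some (done.length : Int)) then false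
       else
         let k := done.length
         if tail > 0 then
           if decide (k ≥ regex.length) || decide (regex.getD k 0 < tail) then false
           else if strict && decide (regex.getD k 0 ≠ tail) then false
           else !strict || decide (k + 1 = regex.length)
         else !strict || decide (k = regex.length)) := by
  have hruns : (PySem.Chars.splitOn cs ['.']).map (fun seg => (PySem.Chars.count seg ['#'] : Int))
      = countsOf cs := by
    rw [splitOn_eq]
    unfold countsOf
    exact List.map_congr_left (fun seg _ => by rw [count_eq_listCount])
  simp only [hruns]
  have hne := countsOf_ne_nil cs
  rw [loop_eq_checkRuns regex strict cs 0 0 (le_refl 0), addFirst_zero _ hne,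
      checkRuns_eq regex strict (countsOf cs) 0 hne]
  simp only [PySem.List.slice_to_neg_one, pyGet_neg_one _ hne, List.drop_zero, Nat.zero_add]
  rw [show PySem.List.slice regex none (some (((countsOf cs).dropLast.filter (fun r => decide (r > 0))).length : Int))
      = regex.take ((countsOf cs).dropLast.filter (fun r => decide (r > 0))).length from
      PySem.List.slice_to_natCast regex _]
  unfold postB
  rcases eq_or_ne ((countsOf cs).dropLast.filter (fun r => decide (r > 0)))
      (regex.take ((countsOf cs).dropLast.filter (fun r => decide (r > 0))).length) with hd | hd
  · rw [if_neg (not_not_intro hd), if_pos hd]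
  · rw [if_pos hd, if_neg hd]

-- ===== VERDICT (by name: the statement is the Claim_ definition above) =====
theorem fast_check_spec : Claim_equal_fast_check := by
  intro s regex _
  unfold Spec_fast_check fast_check fast_check_alt
  by_cases h : PySem.Str.isIn "?" s
  · simp only [h, if_pos, Bool.not_true]
    rw [core_eq regex false]
    simp [PySem.List.slice_zero_start]
  · simp only [h, Bool.not_false, if_neg, Bool.not_eq_true]
    rw [core_eq regex true]
    simp
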